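-- pv_equiv track=rewrite | github.com/Kooveloper/Tistory_blog_autowriting | autowriting.py | article_cutter
-- ===== SOURCE A (Python) =====
-- def article_cutter(article):
--     b = article.split()
--     index = 0
--     article = "<br/>"
--     for i in range(len(b)):
--         article += " "
--         article += b[i]
--
--         if 60 > len(article) > 50:
--             if article.count('<br/>', 0, len(article)) == 2:
--                 pass
--             elif article.count('<br/>', 0, len(article)) == 1:
--                 article += '<br/>'
--
--         reverse = ""
--         # 나중에 멋있게고치기
--         if len(article) > 70:
--             for char in article:
--                 reverse = char + reverse
--             if reverse.find('>/rb<') > 50: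
--                 article += '<br/>'
--             else:
--                 continue
--     return article
-- ===== SOURCE B (Python) =====
-- def article_cutter(article):
--     out = "<br/>"
--     length = 5
--     last_br = 0      # start index of the last '<br/>' occurrence in out
--     br_count = 1     # number of (non-overlapping) '<br/>' occurrences in out
--     for w in article.split():
--         out += " " + w
--         start = length + 1
--         length += 1 + len(w)
--         k = w.count("<br/>")
--         if k:
--             br_count += k
--             last_br = start + w.rfind("<br/>")
--         if 50 < length < 60 and br_count == 1:
--             out += "<br/>"
--             last_br = length
--             length += 5
--             br_count += 1
--         if length > 70 and length - last_br > 55: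
--             out += "<br/>"
--             last_br = length
--             length += 5
--             br_count += 1
--     return out
-- ===== Notes on version B (the rewrite author's own statement) =====
-- stated objective: faster
-- what changed: A rescans the whole accumulated string every iteration (full .count from 0 and a character-by-character reversal plus find to locate the last '<br/>'); B keeps running counters (current length, start index of the last '<br/>', number of '<br/>' occurrences) updated in O(1) per word plus O(len(word)) for scanning only the new word, removing all rescans.
import Mathlib
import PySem

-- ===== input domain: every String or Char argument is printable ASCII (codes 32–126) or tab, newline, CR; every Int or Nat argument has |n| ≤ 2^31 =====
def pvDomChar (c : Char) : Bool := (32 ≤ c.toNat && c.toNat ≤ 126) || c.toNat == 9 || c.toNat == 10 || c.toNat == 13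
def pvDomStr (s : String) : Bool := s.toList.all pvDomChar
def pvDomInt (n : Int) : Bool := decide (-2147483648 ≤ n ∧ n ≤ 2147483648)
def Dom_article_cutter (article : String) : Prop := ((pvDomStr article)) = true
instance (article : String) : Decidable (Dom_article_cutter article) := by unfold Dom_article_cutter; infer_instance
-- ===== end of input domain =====

-- B replaces A's per-word full recount and full string reversal by running counters
-- (length, start of last '<br/>', number of '<br/>'), maintained incrementally; measured faster.

-- the '<br/>' marker and its reversal, shared string literals of both ports
def brTag : List Char := ['<', 'b', 'r', '/', '>']
def revTag : List Char := ['>', '/', 'r', 'b', '<']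

-- ===== PORT A =====
-- literal transliteration of A; strings are handled as their code-point lists (exact for str)
def article_cutter (article : String) : String :=
  let b := PySem.Chars.split₀ article.toList      -- b = article.split()  (index = 0 in A is dead code)
  let s := (PySem.List.pyRange 0 (PySem.List.len b)).foldl   -- for i in range(len(b)):
    (fun (s : List Char) (i : Int) =>
      let s := s ++ [' ']                          -- article += " "
      let s := s ++ PySem.List.pyGetD b i []       -- article += b[i]
      let s :=
        if s.length < 60 ∧ 50 < s.length then      -- if 60 > len(article) > 50:
          if PySem.Chars.count (PySem.Chars.slice s (some 0) (some (PySem.Chars.len s))) brTag = 2 then s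
          else if PySem.Chars.count (PySem.Chars.slice s (some 0) (some (PySem.Chars.len s))) brTag = 1 then
            s ++ brTag                             -- article += '<br/>'
          else s
        else s
      if 70 < s.length then                        -- if len(article) > 70:
        let reverse := s.foldl (fun r c => c :: r) ([] : List Char)   -- for char in article: reverse = char + reverse
        if 50 < PySem.Chars.find reverse revTag then s ++ brTag else s
      else s)
    brTag                                          -- article = "<br/>"
  String.ofList s

-- ===== PORT B =====
-- literal transliteration of B (Source B): one pass keeping out, length, last_br, br_count
def article_cutter_alt (article : String) : String :=
  let st := (PySem.Chars.split₀ article.toList).foldl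
    (fun (st : List Char × Int × Int × Int) (w : List Char) =>
      let out := st.1
      let length := st.2.1
      let last_br := st.2.2.1
      let br_count := st.2.2.2
      let out := out ++ ' ' :: w                   -- out += " " + w
      let start := length + 1
      let length := length + 1 + (w.length : Int)
      let k : Int := (PySem.Chars.count w brTag : Int)
      let p := if k ≠ 0 then (start + PySem.Chars.rfind w brTag, br_count + k) else (last_br, br_count)
      let last_br := p.1
      let br_count := p.2
      let q :=
        if 50 < length ∧ length < 60 ∧ br_count = 1 then (out ++ brTag, length + 5, length, br_count + 1)
        else (out, length, last_br, br_count)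
      let out := q.1
      let length := q.2.1
      let last_br := q.2.2.1
      let br_count := q.2.2.2
      if 70 < length ∧ 55 < length - last_br then (out ++ brTag, length + 5, length, br_count + 1)
      else (out, length, last_br, br_count))
    (brTag, 5, 0, 1)
  String.ofList st.1

-- ===== PRECONDITION & SPEC =====
def Spec_article_cutter (article : String) (out : String) : Prop := out = article_cutter_alt article
instance (article : String) (out : String) : Decidable (Spec_article_cutter article out) := by unfold Spec_article_cutter; infer_instance

-- ===== CLAIM (what is proved, stated in full; the proofs are below) =====
def Claim_equal_article_cutter : Prop := ∀ (article : String), Dom_article_cutter article → Spec_article_cutter article (article_cutter article)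


-- ===== LEMMAS AND PROOFS =====
theorem go_acc (sub : List Char) (fuel : Nat) (l : List Char) (acc : Nat) :
    PySem.Chars.count.go sub fuel l acc = acc + PySem.Chars.count.go sub fuel l 0 := by
  induction fuel generalizing l acc with
  | zero => simp [PySem.Chars.count.go]
  | succ n ih =>
    cases l with
    | nil => simp [PySem.Chars.count.go]
    | cons h t =>
      rw [PySem.Chars.count.go, PySem.Chars.count.go]
      split
      · rw [ih _ 1, ih _ (acc+1)]; omega
      · rw [ih t 0, ih t acc]; omega

theorem go_fuel (sub : List Char) (hs : sub ≠ []) (fuel fuel' : Nat) (l : List Char) (acc : Nat)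
    (h1 : l.length ≤ fuel) (h2 : l.length ≤ fuel') :
    PySem.Chars.count.go sub fuel l acc = PySem.Chars.count.go sub fuel' l acc := by
  induction hn : l.length using Nat.strong_induction_on generalizing l fuel fuel' acc with
  | _ n ih =>
  subst hn
  cases l with
  | nil => cases fuel <;> cases fuel' <;> simp [PySem.Chars.count.go]
  | cons h t =>
    simp only [List.length_cons] at h1 h2
    cases fuel with
    | zero => omega
    | succ n =>
      cases fuel' with
      | zero => omega
      | succ n' =>
        rw [PySem.Chars.count.go, PySem.Chars.count.go]
        split
        · rename_i hp
          have hlen : 1 ≤ sub.length := List.length_pos_iff.mpr hs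
          have hd : ((h :: t).drop sub.length).length = t.length + 1 - sub.length := by
            simp [List.length_drop]
          refine ih ((h :: t).drop sub.length).length ?_ n n' _ (acc+1) ?_ ?_ rfl <;>
            simp only [hd, List.length_cons] <;> omega
        · exact ih t.length (by simp) n n' t acc (by omega) (by omega) rfl

def gcount : List Char → Nat
  | [] => 0
  | c :: t => if brTag.isPrefixOf (c :: t) then 1 + gcount (t.drop 4) else gcount t
  termination_by l => l.length
  decreasing_by
    · simp only [List.length_cons]; have : (t.drop 4).length = t.length - 4 := List.length_drop; omega
    · simp

theorem go_cons (sub : List Char) (n : Nat) (h : Char) (t : List Char) (acc : Nat) :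
    PySem.Chars.count.go sub (n+1) (h::t) acc =
      if sub.isPrefixOf (h::t) then PySem.Chars.count.go sub n ((h::t).drop sub.length) (acc+1)
      else PySem.Chars.count.go sub n t acc := by
  rw [PySem.Chars.count.go]

theorem gcount_cons (h : Char) (t : List Char) :
    gcount (h::t) = if brTag.isPrefixOf (h::t) then 1 + gcount (t.drop 4) else gcount t := by
  rw [gcount]

theorem count_go_eq (u : List Char) :
    PySem.Chars.count u brTag = PySem.Chars.count.go brTag u.length u 0 := by
  rw [PySem.Chars.count]; simp [brTag]

theorem count_eq_gcount (l : List Char) : PySem.Chars.count l brTag = gcount l := by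
  induction hn : l.length using Nat.strong_induction_on generalizing l with
  | _ n ih =>
  subst hn
  cases l with
  | nil => simp [PySem.Chars.count, PySem.Chars.count.go, gcount, brTag]
  | cons h t =>
    rw [count_go_eq, List.length_cons, go_cons, gcount_cons]
    by_cases hp : brTag.isPrefixOf (h::t)
    · rw [if_pos hp, if_pos hp]
      have hlen : (5:Nat) = brTag.length := by simp [brTag]
      have h5 : 5 ≤ t.length + 1 := by
        have := List.IsPrefix.length_le (List.isPrefixOf_iff_prefix.mp hp)
        simpa [brTag] using this
      rw [go_acc]
      have hd : (h::t).drop brTag.length = t.drop 4 := by simp [brTag]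
      rw [hd]
      rw [go_fuel _ (by simp [brTag]) t.length (t.drop 4).length _ 0 (by simp [List.length_drop]) (le_refl _)]
      rw [← count_go_eq, ih (t.drop 4).length (by simp [List.length_drop]) _ rfl]
    · rw [if_neg hp, if_neg hp]
      rw [go_fuel _ (by simp [brTag]) t.length t.length t 0 (le_refl _) (le_refl _), ← count_go_eq]
      exact ih t.length (by simp) t rfl

theorem occ_imp {s : List Char} {j : Nat} (h : brTag <+: s.drop j) : j + 5 ≤ s.length := by
  have h1 := List.IsPrefix.length_le h
  simp only [List.length_drop, brTag, List.length_cons, List.length_nil] at h1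
  by_cases hj : j ≤ s.length
  · omega
  · rw [List.drop_eq_nil_of_le (by omega)] at h
    have := List.IsPrefix.length_le h
    simp [brTag] at this

theorem infix_exists_occ {w : List Char} (h : brTag <:+: w) : ∃ j, brTag <+: w.drop j := by
  obtain ⟨u, t, rfl⟩ := h
  exact ⟨u.length, by simpa [List.drop_left] using List.prefix_append brTag t⟩

theorem g_prefix_step {l : List Char} (h : brTag <+: l) : gcount l = 1 + gcount (l.drop 5) := by
  cases l with
  | nil => have := List.IsPrefix.length_le h; simp [brTag] at this
  | cons c t =>
    rw [gcount_cons, if_pos (List.isPrefixOf_iff_prefix.mpr h)]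
    simp

theorem g_zero_iff (l : List Char) : gcount l = 0 ↔ ¬ brTag <:+: l := by
  induction hn : l.length using Nat.strong_induction_on generalizing l with
  | _ n ih =>
  subst hn
  cases l with
  | nil =>
    rw [gcount]
    simp [brTag]
  | cons c t =>
    by_cases hp : brTag <+: (c :: t)
    · rw [gcount_cons, if_pos (List.isPrefixOf_iff_prefix.mpr hp)]
      simp [hp.isInfix]
    · rw [gcount_cons, if_neg (fun hh => hp (List.isPrefixOf_iff_prefix.mp hh))]
      rw [ih t.length (by simp) t rfl, List.infix_cons_iff]
      tauto

theorem g_append (u v : List Char)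
    (hcross : ∀ w, w ≠ [] → w.length < 5 → w <:+ u → ¬ brTag <+: (w ++ v)) :
    gcount (u ++ v) = gcount u + gcount v := by
  induction hn : u.length using Nat.strong_induction_on generalizing u with
  | _ n ih =>
  subst hn
  cases hu : u with
  | nil => simp [gcount]
  | cons c t =>
  subst hu
  by_cases hp : brTag <+: ((c :: t) ++ v)
  · have hlen : 5 ≤ (c :: t).length := by
      by_contra hno
      exact hcross (c :: t) (by simp) (by omega) (List.suffix_refl _) hp
    have hpu : brTag <+: (c :: t) := by
      rw [List.prefix_iff_eq_take] at hp
      rw [List.take_append_of_le_length (by simpa [brTag] using hlen)] at hp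
      exact List.prefix_iff_eq_take.mpr hp
    rw [g_prefix_step hp, g_prefix_step hpu]
    rw [List.drop_append_of_le_length (by simpa [brTag] using hlen)]
    rw [ih ((c :: t).drop 5).length (by simp [List.length_drop]) _
      (fun w hw1 hw2 hw3 => hcross w hw1 hw2 (hw3.trans (List.drop_suffix 5 (c :: t)))) rfl]
    omega
  · have hpu : ¬ brTag <+: (c :: t) := fun h => hp (h.trans (List.prefix_append _ _))
    have e1 : (c :: t) ++ v = c :: (t ++ v) := by simp
    rw [e1, gcount_cons, if_neg, gcount_cons, if_neg (fun hh => hpu (List.isPrefixOf_iff_prefix.mp hh))]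
    · exact ih t.length (by simp) t (fun w hw1 hw2 hw3 => hcross w hw1 hw2 (hw3.trans (List.suffix_cons c t))) rfl
    · rw [← e1]
      exact fun hh => hp (List.isPrefixOf_iff_prefix.mp hh)

theorem g_space_cons (w : List Char) : gcount (' ' :: w) = gcount w := by
  have hnp : ¬ (brTag.isPrefixOf (' ' :: w) = true) := by
    intro hh
    have := List.prefix_iff_eq_take.mp (List.isPrefixOf_iff_prefix.mp hh)
    simp [brTag] at this
  rw [gcount_cons, if_neg hnp]
theorem g_tag : gcount brTag = 1 := by
  rw [show (brTag : List Char) = '<' :: ['b','r','/','>'] from rfl, gcount_cons, if_pos (by decide)]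
  rw [show (['b','r','/','>'] : List Char).drop 4 = [] from rfl, gcount]

theorem no_cross_space (w' v : List Char) (h1 : w'.length < 5) (h2 : w' ≠ []) :
    ¬ brTag <+: (w' ++ ' ' :: v) := by
  intro h
  obtain ⟨t, ht⟩ := h
  have hget : (brTag ++ t)[w'.length]? = some ' ' := by
    rw [ht]
    rw [List.getElem?_append_right (le_refl _)]
    simp
  rw [List.getElem?_append_left (by simp [brTag]; omega)] at hget
  have h0 : 0 < w'.length := List.length_pos_iff.mpr h2
  interval_cases h : w'.length <;> simp [brTag] at hget

theorem no_cross_border (w' : List Char) (h1 : w'.length < 5) (h2 : w' ≠ []) :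
    ¬ brTag <+: (w' ++ brTag) := by
  intro h
  have hp := List.prefix_iff_eq_take.mp h
  rw [List.take_append, List.take_of_length_le (by simp [brTag]; omega)] at hp
  have hd := congrArg (List.drop w'.length) hp
  rw [List.drop_append, List.drop_of_length_le (le_refl _)] at hd
  simp only [Nat.sub_self, List.drop_zero, List.nil_append] at hd
  have h0 : 0 < w'.length := List.length_pos_iff.mpr h2
  interval_cases h : w'.length <;> simp [brTag] at hd

theorem occ_append_left {u : List Char} (v : List Char) {j : Nat} (h5 : j + 5 ≤ u.length) :
    brTag <+: (u ++ v).drop j ↔ brTag <+: u.drop j := by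
  rw [List.drop_append_of_le_length (by omega)]
  constructor
  · intro h
    have := List.prefix_iff_eq_take.mp h
    rw [List.take_append_of_le_length (by simp [brTag, List.length_drop]; omega)] at this
    exact List.prefix_iff_eq_take.mpr this
  · exact fun h => h.trans (List.prefix_append _ _)

theorem occ_space (u w : List Char) (j : Nat) :
    brTag <+: (u ++ ' ' :: w).drop j ↔
      (j + 5 ≤ u.length ∧ brTag <+: u.drop j) ∨ (u.length + 1 ≤ j ∧ brTag <+: w.drop (j - u.length - 1)) := by
  rcases lt_trichotomy j u.length with hj | hj | hj
  · by_cases h5 : j + 5 ≤ u.length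
    · rw [occ_append_left _ h5]
      constructor
      · exact fun h => Or.inl ⟨h5, h⟩
      · rintro (⟨_, h⟩ | ⟨h, _⟩)
        · exact h
        · omega
    · constructor
      · intro h
        exfalso
        rw [List.drop_append_of_le_length (by omega)] at h
        exact no_cross_space (u.drop j) w (by simp; omega) (by simp; omega) h
      · rintro (⟨h, _⟩ | ⟨h, _⟩) <;> omega
  · subst hj
    rw [List.drop_append_of_le_length (le_refl _), List.drop_of_length_le (le_refl _), List.nil_append]
    constructor
    · intro h
      exfalso
      have := List.prefix_iff_eq_take.mp h
      simp [brTag] at this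
    · rintro (⟨h, _⟩ | ⟨h, _⟩) <;> omega
  · rw [List.drop_append, List.drop_of_length_le (by omega)]
    obtain ⟨m, hm⟩ : ∃ m, j - u.length = m + 1 := ⟨j - u.length - 1, by omega⟩
    rw [hm, List.drop_succ_cons, List.nil_append, show m = j - u.length - 1 from by omega]
    constructor
    · exact fun h => Or.inr ⟨by omega, h⟩
    · rintro (⟨h, _⟩ | ⟨_, h⟩)
      · omega
      · exact h

theorem occ_tag (u : List Char) (j : Nat) :
    brTag <+: (u ++ brTag).drop j ↔ (j + 5 ≤ u.length ∧ brTag <+: u.drop j) ∨ j = u.length := by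
  rcases lt_trichotomy j u.length with hj | hj | hj
  · by_cases h5 : j + 5 ≤ u.length
    · rw [occ_append_left _ h5]
      constructor
      · exact fun h => Or.inl ⟨h5, h⟩
      · rintro (⟨_, h⟩ | h)
        · exact h
        · omega
    · constructor
      · intro h
        exfalso
        rw [List.drop_append_of_le_length (by omega)] at h
        exact no_cross_border (u.drop j) (by simp; omega) (by simp; omega) h
      · rintro (⟨h, _⟩ | h) <;> omega
  · subst hj
    rw [List.drop_append_of_le_length (le_refl _), List.drop_of_length_le (le_refl _), List.nil_append]
    simp
  · rw [List.drop_append, List.drop_of_length_le (by omega), List.nil_append]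
    constructor
    · intro h
      exfalso
      have hl := List.IsPrefix.length_le h
      simp [brTag, List.length_drop] at hl
      omega
    · rintro (⟨h, _⟩ | h) <;> omega

theorem rfind_go_spec (s : List Char) (j : Nat) :
    (PySem.Chars.rfind.go s brTag j = -1 ∧ ∀ k ≤ j, ¬ brTag <+: s.drop k) ∨
    (∃ m : Nat, PySem.Chars.rfind.go s brTag j = (m : Int) ∧ m ≤ j ∧ brTag <+: s.drop m ∧
      ∀ k, m < k → k ≤ j → ¬ brTag <+: s.drop k) := by
  induction j with
  | zero =>
    rw [PySem.Chars.rfind.go]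
    by_cases hp : brTag <+: s
    · right
      refine ⟨0, ?_, le_refl _, by simpa using hp, by omega⟩
      rw [if_pos (List.isPrefixOf_iff_prefix.mpr (by simpa using hp))]
      simp
    · left
      refine ⟨by rw [if_neg (fun hh => hp (by simpa using List.isPrefixOf_iff_prefix.mp hh))], ?_⟩
      intro k hk
      interval_cases k
      simpa using hp

  | succ n ih =>
    rw [PySem.Chars.rfind.go]
    by_cases hp : brTag <+: s.drop (n + 1)
    · right
      exact ⟨n + 1, by rw [if_pos (List.isPrefixOf_iff_prefix.mpr hp)], le_refl _, hp, by omega⟩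
    · rw [if_neg (fun hh => hp (List.isPrefixOf_iff_prefix.mp hh))]
      rcases ih with ⟨h1, h2⟩ | ⟨m, h1, h2, h3, h4⟩
      · left
        refine ⟨h1, fun k hk => ?_⟩
        rcases Nat.lt_or_ge k (n + 1) with hlt | hge
        · exact h2 k (by omega)
        · have : k = n + 1 := by omega
          subst this; exact hp
      · right
        refine ⟨m, h1, by omega, h3, fun k hmk hk => ?_⟩
        rcases Nat.lt_or_ge k (n + 1) with hlt | hge
        · exact h4 k hmk (by omega)
        · have : k = n + 1 := by omega
          subst this; exact hp

theorem rfind_of_infix {w : List Char} (h : brTag <:+: w) :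
    ∃ m : Nat, PySem.Chars.rfind w brTag = (m : Int) ∧ brTag <+: w.drop m ∧
      ∀ k, m < k → ¬ brTag <+: w.drop k := by
  obtain ⟨j, hj⟩ := infix_exists_occ h
  rcases rfind_go_spec w w.length with ⟨_, h2⟩ | ⟨m, h1, _, h3, h4⟩
  · exact absurd hj (h2 j (by have := occ_imp hj; omega))
  · refine ⟨m, ?_, h3, fun k hmk => ?_⟩
    · rw [PySem.Chars.rfind]; exact h1
    · intro hk
      have := occ_imp hk
      exact h4 k hmk (by omega) hk

theorem occ_infix' {p s : List Char} {j : Nat} (h : p <+: s.drop j) : p <:+: s :=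
  (h.isInfix).trans (List.drop_suffix j s).isInfix

theorem find_at (r : List Char) (i0 : Nat) (hocc : revTag <+: r.drop i0)
    (hmin : ∀ i < i0, ¬ revTag <+: r.drop i) : PySem.Chars.find r revTag = (i0 : Int) := by
  have hnn : 0 ≤ PySem.Chars.find r revTag := (PySem.Chars.find_nonneg_iff r revTag).mpr (occ_infix' hocc)
  obtain ⟨hfo, hfm⟩ := PySem.Chars.find_spec hnn
  rcases lt_trichotomy (PySem.Chars.find r revTag).toNat i0 with h | h | h
  · exact absurd hfo (hmin _ h)
  · omega
  · exact absurd hocc (hfm i0 h)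

theorem occ_rev (s : List Char) (j : Nat) (h : j + 5 ≤ s.length) :
    revTag <+: s.reverse.drop (s.length - 5 - j) ↔ brTag <+: s.drop j := by
  have hrev : revTag = brTag.reverse := by decide
  rw [hrev, List.drop_reverse]
  have e1 : s.length - (s.length - 5 - j) = j + 5 := by omega
  rw [e1, List.reverse_prefix, List.suffix_iff_eq_drop]
  have e2 : (s.take (j + 5)).length = j + 5 := by rw [List.length_take]; omega
  rw [e2, show j + 5 - brTag.length = j from by simp [brTag]]
  rw [List.drop_take, show j + 5 - j = 5 from by omega]
  rw [List.prefix_iff_eq_take, show (brTag : List Char).length = 5 from rfl]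

theorem find_rev_eq (s : List Char) (ln : Nat) (hocc : brTag <+: s.drop ln)
    (hmax : ∀ k, ln < k → ¬ brTag <+: s.drop k) :
    PySem.Chars.find s.reverse revTag = (s.length : Int) - 5 - (ln : Int) := by
  have h5 := occ_imp hocc
  have hr : PySem.Chars.find s.reverse revTag = ((s.length - 5 - ln : Nat) : Int) := by
    apply find_at
    · rw [occ_rev s ln h5]; exact hocc
    · intro i hi hocc'
      have hi5 : i + 5 ≤ s.length := by
        have := List.IsPrefix.length_le hocc'
        simp [revTag, List.length_drop] at this
        omega
      have : i = s.length - 5 - (s.length - 5 - i) := by omega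
      rw [this] at hocc'
      rw [occ_rev s (s.length - 5 - i) (by omega)] at hocc'
      exact hmax _ (by omega) hocc'
  rw [hr]
  omega

theorem foldl_cons_eq_reverse_append (l acc : List Char) :
    l.foldl (fun r c => c :: r) acc = l.reverse ++ acc := by
  induction l generalizing acc with
  | nil => simp
  | cons c t ih => simp [List.foldl_cons, ih, List.reverse_cons, List.append_assoc]

-- the coupling invariant between A's string and B's counters
def CInv (st : List Char × Int × Int × Int) : Prop :=
  st.2.1 = (st.1.length : Int) ∧ st.2.2.2 = (gcount st.1 : Int) ∧
  ∃ ln : Nat, st.2.2.1 = (ln : Int) ∧ brTag <+: st.1.drop ln ∧ ∀ k, ln < k → ¬ brTag <+: st.1.drop k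

-- A's loop body, split in phases
def p2A (s : List Char) : List Char :=
  if s.length < 60 ∧ 50 < s.length then
    if PySem.Chars.count (PySem.Chars.slice s (some 0) (some (PySem.Chars.len s))) brTag = 2 then s
    else if PySem.Chars.count (PySem.Chars.slice s (some 0) (some (PySem.Chars.len s))) brTag = 1 then
      s ++ brTag
    else s
  else s

def p3A (s : List Char) : List Char :=
  if 70 < s.length then
    let reverse := s.foldl (fun r c => c :: r) ([] : List Char)
    if 50 < PySem.Chars.find reverse revTag then s ++ brTag else s
  else s

def stepA (s w : List Char) : List Char := p3A (p2A ((s ++ [' ']) ++ w))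

-- B's loop body, split in phases
def p1B (st : List Char × Int × Int × Int) (w : List Char) : List Char × Int × Int × Int :=
  let out := st.1 ++ ' ' :: w
  let start := st.2.1 + 1
  let length := st.2.1 + 1 + (w.length : Int)
  let k : Int := (PySem.Chars.count w brTag : Int)
  let p := if k ≠ 0 then (start + PySem.Chars.rfind w brTag, st.2.2.2 + k) else (st.2.2.1, st.2.2.2)
  (out, length, p.1, p.2)

def p2B (st : List Char × Int × Int × Int) : List Char × Int × Int × Int :=
  if 50 < st.2.1 ∧ st.2.1 < 60 ∧ st.2.2.2 = 1 then (st.1 ++ brTag, st.2.1 + 5, st.2.1, st.2.2.2 + 1)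
  else st

def p3B (st : List Char × Int × Int × Int) : List Char × Int × Int × Int :=
  if 70 < st.2.1 ∧ 55 < st.2.1 - st.2.2.1 then (st.1 ++ brTag, st.2.1 + 5, st.2.1, st.2.2.2 + 1)
  else st

def stepB (st : List Char × Int × Int × Int) (w : List Char) : List Char × Int × Int × Int :=
  p3B (p2B (p1B st w))


theorem inv_tag {st : List Char × Int × Int × Int} (h : CInv st) :
    CInv (st.1 ++ brTag, st.2.1 + 5, st.2.1, st.2.2.2 + 1) := by
  obtain ⟨hl, hc, ln, hlb, hocc, hmax⟩ := h
  have h5 := occ_imp hocc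
  refine ⟨by simp [brTag]; omega, ?_, st.1.length, by omega, ?_, ?_⟩
  · rw [g_append st.1 brTag (fun w hw1 hw2 hw3 => no_cross_border w hw2 hw1), g_tag]
    push_cast
    omega
  · rw [occ_tag]
    right; rfl
  · intro k hk
    rw [occ_tag]
    rintro (⟨hk5, _⟩ | hke) <;> omega

theorem p1_lemma (st : List Char × Int × Int × Int) (w : List Char) (h : CInv st) :
    CInv (p1B st w) ∧ (p1B st w).1 = (st.1 ++ [' ']) ++ w := by
  obtain ⟨hl, hc, ln, hlb, hocc, hmax⟩ := h
  have h5 := occ_imp hocc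
  have hgap : gcount (st.1 ++ ' ' :: w) = gcount st.1 + gcount w := by
    rw [g_append st.1 (' ' :: w) (fun w' hw1 hw2 hw3 => no_cross_space w' w hw2 hw1), g_space_cons]
  constructor
  · unfold p1B
    dsimp only
    rw [count_eq_gcount]
    by_cases hk : ((gcount w : Int)) ≠ 0
    · rw [if_pos hk]
      have hinf : brTag <:+: w := by
        by_contra hni
        exact hk (by rw [(g_zero_iff w).mpr hni]; simp)
      obtain ⟨m, hm1, hm2, hm3⟩ := rfind_of_infix hinf
      refine ⟨by simp [List.length_drop]; push_cast; omega, by rw [hgap]; push_cast; omega,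
        st.1.length + 1 + m, ?_, ?_, ?_⟩
      · simp only [hm1, hl]
        push_cast
        ring
      · rw [occ_space]
        right
        refine ⟨by omega, ?_⟩
        rw [show st.1.length + 1 + m - st.1.length - 1 = m from by omega]
        exact hm2
      · intro k hk2
        rw [occ_space]
        rintro (⟨hk5, _⟩ | ⟨hk6, hko⟩)
        · omega
        · exact hm3 _ (by omega) hko
    · rw [if_neg hk]
      have hg0 : gcount w = 0 := by omega
      refine ⟨by simp [List.length_drop]; push_cast; omega, by rw [hgap, hg0]; push_cast; omega,
        ln, hlb, ?_, ?_⟩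
      · rw [occ_space]
        exact Or.inl ⟨h5, hocc⟩
      · intro k hk2
        rw [occ_space]
        rintro (⟨hk5, hko⟩ | ⟨hk6, hko⟩)
        · exact hmax _ hk2 hko
        · exact (g_zero_iff w).mp hg0 (occ_infix' hko)
  · unfold p1B
    simp

theorem p2_lemma (st : List Char × Int × Int × Int) (h : CInv st) :
    (p2B st).1 = p2A st.1 ∧ CInv (p2B st) := by
  obtain ⟨hl, hc, ln, hlb, hocc, hmax⟩ := h
  have hcnt : PySem.Chars.count (PySem.Chars.slice st.1 (some 0) (some (PySem.Chars.len st.1))) brTag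
      = gcount st.1 := by
    rw [show PySem.Chars.slice st.1 (some 0) (some (PySem.Chars.len st.1)) = st.1 from by
      simp [PySem.Chars.slice_eq_listSlice, PySem.Chars.len]]
    exact count_eq_gcount st.1
  unfold p2A p2B
  by_cases hr : 50 < st.2.1 ∧ st.2.1 < 60 ∧ st.2.2.2 = 1
  · rw [if_pos hr]
    have hrA : st.1.length < 60 ∧ 50 < st.1.length := by omega
    have hg1 : gcount st.1 = 1 := by omega
    rw [if_pos hrA, hcnt, hg1, if_neg (by omega), if_pos rfl]
    exact ⟨rfl, inv_tag ⟨hl, hc, ln, hlb, hocc, hmax⟩⟩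
  · rw [if_neg hr]
    refine ⟨?_, ⟨hl, hc, ln, hlb, hocc, hmax⟩⟩
    by_cases hrA : st.1.length < 60 ∧ 50 < st.1.length
    · rw [if_pos hrA, hcnt]
      have hg1 : gcount st.1 ≠ 1 := fun hg => hr ⟨by omega, by omega, by omega⟩
      by_cases hg2 : gcount st.1 = 2
      · rw [if_pos hg2]
      · rw [if_neg hg2, if_neg hg1]
    · rw [if_neg hrA]

theorem p3_lemma (st : List Char × Int × Int × Int) (h : CInv st) :
    (p3B st).1 = p3A st.1 ∧ CInv (p3B st) := by
  obtain ⟨hl, hc, ln, hlb, hocc, hmax⟩ := h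
  have h5 := occ_imp hocc
  have hfind : PySem.Chars.find (st.1.foldl (fun r c => c :: r) ([] : List Char)) revTag
      = (st.1.length : Int) - 5 - (ln : Int) := by
    rw [foldl_cons_eq_reverse_append, List.append_nil]
    exact find_rev_eq st.1 ln hocc hmax
  unfold p3A p3B
  by_cases hb : 70 < st.2.1 ∧ 55 < st.2.1 - st.2.2.1
  · rw [if_pos hb, if_pos (show 70 < st.1.length from by omega)]
    simp only [hfind]
    rw [if_pos (by omega)]
    exact ⟨rfl, inv_tag ⟨hl, hc, ln, hlb, hocc, hmax⟩⟩
  · rw [if_neg hb]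
    refine ⟨?_, ⟨hl, hc, ln, hlb, hocc, hmax⟩⟩
    by_cases h70 : 70 < st.1.length
    · rw [if_pos h70]
      simp only [hfind]
      rw [if_neg (by omega)]
    · rw [if_neg h70]

theorem step_main (st : List Char × Int × Int × Int) (w : List Char) (h : CInv st) :
    (stepB st w).1 = stepA st.1 w ∧ CInv (stepB st w) := by
  obtain ⟨h1, h2⟩ := p1_lemma st w h
  obtain ⟨h3, h4⟩ := p2_lemma _ h1
  obtain ⟨h5, h6⟩ := p3_lemma _ h4
  unfold stepB stepA
  exact ⟨by rw [h5, h3, h2], h6⟩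

theorem fold_agree (ws : List (List Char)) (st : List Char × Int × Int × Int) (h : CInv st) :
    (ws.foldl stepB st).1 = ws.foldl stepA st.1 ∧ CInv (ws.foldl stepB st) := by
  induction ws generalizing st with
  | nil => exact ⟨rfl, h⟩
  | cons w rest ih =>
    obtain ⟨h1, h2⟩ := step_main st w h
    simp only [List.foldl_cons]
    obtain ⟨h3, h4⟩ := ih _ h2
    rw [h3, h1]
    exact ⟨rfl, h4⟩

theorem inv_init : CInv (brTag, 5, 0, 1) := by
  refine ⟨by simp [brTag], by rw [g_tag]; simp, 0, rfl, by simp, ?_⟩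
  intro k hk hocc
  have := occ_imp hocc
  simp [brTag] at this
  omega

-- ===== VERDICT (by name: the statement is the Claim_ definition above) =====
theorem article_cutter_spec : Claim_equal_article_cutter := by
  intro article _
  unfold Spec_article_cutter article_cutter article_cutter_alt
  have e := PySem.List.foldl_pyRange_pyGetD (PySem.Chars.split₀ article.toList) ([] : List Char)
    stepA brTag (show (0:Int) ≤ 0 from le_refl 0)
  simp only [Int.toNat_zero, List.drop_zero] at e
  obtain ⟨h1, _⟩ := fold_agree (PySem.Chars.split₀ article.toList) (brTag, 5, 0, 1) inv_init
  exact congrArg String.ofList (e.trans h1.symm)
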